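-- pv_equiv track=rewrite | github.com/bl166/wireless_digital_twin_milcom | utils/datagen.py | get_links_nodes
-- ===== SOURCE A (Python) =====
-- def get_links_nodes(links, nodes):
--     """
--       Extracta links to nodes features.
--     """
--     nodes_to_links = []  # **list of link indices that start with each node**
--     sequences_links_nodes = []  # **chunks nodes_to_links by which nodes**
--     count_link = 0
--     for elem in nodes:        # for each node
--         for i in range(len(links)):   # for each link
--             if links[i][0] == elem:          # if this node is the source node of the link
--                 nodes_to_links.append(i)                 # append link index
--                 sequences_links_nodes.append(count_link) # append node count (same to node index)
--         count_link += 1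
--
--     links_to_nodes = []  # **list of src node index of all links (order = link index order)**
--     for i in range(len(links)):      # for each link
--         links_to_nodes.append(links[i][0])  # append the source node index
--     return nodes_to_links, sequences_links_nodes, links_to_nodes  #n_link
-- ===== SOURCE B (Python) =====
-- def get_links_nodes(links, nodes):
--     # One pass over links builds src -> [link indices]; then one pass over nodes.
--     links_to_nodes = [link[0] for link in links]
--     by_src = {}
--     for i, s in enumerate(links_to_nodes):
--         by_src.setdefault(s, []).append(i)
--     nodes_to_links = []
--     sequences_links_nodes = []
--     for j, elem in enumerate(nodes):
--         idxs = by_src.get(elem, [])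
--         nodes_to_links += idxs
--         sequences_links_nodes += [j] * len(idxs)
--     return nodes_to_links, sequences_links_nodes, links_to_nodes
-- ===== Notes on version B (the rewrite author's own statement) =====
-- stated objective: faster
-- what changed: Replaces the nested node x link scan by a dict from source node to its link indices built in one pass over links, then a single pass over nodes.
import Mathlib
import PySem

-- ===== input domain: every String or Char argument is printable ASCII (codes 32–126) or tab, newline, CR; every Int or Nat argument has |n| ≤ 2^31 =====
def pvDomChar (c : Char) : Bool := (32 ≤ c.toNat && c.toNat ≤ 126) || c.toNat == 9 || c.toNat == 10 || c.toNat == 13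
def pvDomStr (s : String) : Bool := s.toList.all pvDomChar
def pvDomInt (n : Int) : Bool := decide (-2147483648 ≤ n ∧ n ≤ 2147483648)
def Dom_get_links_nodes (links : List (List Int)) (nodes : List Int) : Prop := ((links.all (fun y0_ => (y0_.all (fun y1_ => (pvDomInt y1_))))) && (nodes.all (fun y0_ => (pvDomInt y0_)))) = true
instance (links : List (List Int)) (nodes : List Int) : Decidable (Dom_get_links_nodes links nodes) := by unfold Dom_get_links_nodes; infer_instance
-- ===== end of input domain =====

-- B replaces A's nested node×link scan by a dict source-node → link-indices built in one link pass (objective: faster).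

-- ===== PORT A =====
def get_links_nodes (links : List (List Int)) (nodes : List Int) : List Int × List Int × List Int :=
  let r := nodes.foldl
    (fun (st : List Int × List Int × Int) (elem : Int) =>
      let inner := (PySem.List.pyRange 0 links.length 1).foldl
        (fun (p : List Int × List Int) (i : Int) =>
          if PySem.List.pyGetD (PySem.List.pyGetD links i []) 0 0 == elem
          then (p.1 ++ [i], p.2 ++ [st.2.2]) else p)
        (st.1, st.2.1)
      (inner.1, inner.2, st.2.2 + 1))
    (([] : List Int), ([] : List Int), (0 : Int))
  let links_to_nodes := (PySem.List.pyRange 0 links.length 1).foldl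
    (fun (acc : List Int) (i : Int) =>
      acc ++ [PySem.List.pyGetD (PySem.List.pyGetD links i []) 0 0]) []
  (r.1, r.2.1, links_to_nodes)

-- ===== PORT B =====
def get_links_nodes_alt (links : List (List Int)) (nodes : List Int) : List Int × List Int × List Int :=
  let srcs := links.map (fun l => PySem.List.pyGetD l 0 0)
  let bySrc := ((PySem.List.enumerate srcs).map (fun q => (q.2, q.1))).foldl
    (fun (d : PySem.Dict Int (List Int)) p => d.modify p.1 [] (· ++ [p.2])) PySem.Dict.empty
  let r := (PySem.List.enumerate nodes).foldl
    (fun (acc : List Int × List Int) (q : Int × Int) =>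
      let idxs := bySrc.getD q.2 []
      (acc.1 ++ idxs, acc.2 ++ List.replicate idxs.length q.1)) ([], [])
  (r.1, r.2, srcs)

-- ===== PRECONDITION & SPEC =====
-- Pre_ excludes inputs containing an empty link, on which the Python A raises IndexError at links[i][0].
def Pre_get_links_nodes (links : List (List Int)) (nodes : List Int) : Prop :=
  ∀ l ∈ links, l ≠ []
instance (links : List (List Int)) (nodes : List Int) : Decidable (Pre_get_links_nodes links nodes) := by unfold Pre_get_links_nodes; infer_instance
def pvWitness_get_links_nodes : List (List Int) × List Int := ([[0, 1], [1, 0], [0, 2]], [0, 1, 2])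

def Spec_get_links_nodes (links : List (List Int)) (nodes : List Int) (out : List Int × List Int × List Int) : Prop := out = get_links_nodes_alt links nodes
instance (links : List (List Int)) (nodes : List Int) (out : List Int × List Int × List Int) : Decidable (Spec_get_links_nodes links nodes out) := by unfold Spec_get_links_nodes; infer_instance

-- ===== CLAIM (what is proved, stated in full; the proofs are below) =====
def Claim_equal_get_links_nodes : Prop := ∀ (links : List (List Int)) (nodes : List Int), Dom_get_links_nodes links nodes → Pre_get_links_nodes links nodes → Spec_get_links_nodes links nodes (get_links_nodes links nodes)

-- ===== LEMMAS AND PROOFS =====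

-- the source value A reads for link index i (default 0 only reachable outside Pre_/range)
def gsrc (links : List (List Int)) (i : Int) : Int :=
  PySem.List.pyGetD (PySem.List.pyGetD links i []) 0 0

-- the group of link indices whose source is e, in index order
def grp (links : List (List Int)) (e : Int) : List Int :=
  (PySem.List.pyRange 0 links.length 1).filter (fun i => gsrc links i == e)

-- A's inner loop shape: conditional append of the index to one list and of a constant to the other
theorem pairFold (l : List Int) (p : Int → Bool) (c : Int) (a b : List Int) :
    l.foldl (fun acc i => if p i then (acc.1 ++ [i], acc.2 ++ [c]) else acc) (a, b)
    = (a ++ l.filter p, b ++ List.replicate (l.filter p).length c) := by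
  induction l generalizing a b with
  | nil => simp
  | cons x xs ih =>
    by_cases h : p x <;>
      simp [h, ih, List.replicate_succ, List.append_assoc]

theorem mapSrc (links : List (List Int)) :
    (PySem.List.pyRange 0 links.length 1).map (fun i => gsrc links i)
    = links.map (fun l => PySem.List.pyGetD l 0 0) := by
  have h := PySem.List.map_pyGetD_pyRange_zero links ([] : List Int)
  calc (PySem.List.pyRange 0 links.length 1).map (fun i => gsrc links i)
      = ((PySem.List.pyRange 0 links.length 1).map (fun i => PySem.List.pyGetD links i [])).map
          (fun l => PySem.List.pyGetD l 0 0) := by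
        rw [List.map_map]; rfl
    _ = links.map (fun l => PySem.List.pyGetD l 0 0) := by
        rw [show (PySem.List.pyRange 0 (links.length : Int) 1) = PySem.List.pyRange 0 (PySem.List.len links) 1 from by simp [PySem.List.len_eq], h]

theorem srcAt (links : List (List Int)) (i : Int) :
    PySem.List.pyGetD (links.map (fun l => PySem.List.pyGetD l 0 0)) i 0 = gsrc links i := by
  have h := PySem.List.pyGetD_map (fun l => PySem.List.pyGetD l 0 0) links i ([] : List Int)
  simpa [gsrc] using h

-- B's dict lookup is exactly the group of link indices with source e
theorem dictGrp (links : List (List Int)) (e : Int) :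
    (((PySem.List.enumerate (links.map (fun l => PySem.List.pyGetD l 0 0))).map (fun q => (q.2, q.1))).foldl
      (fun (d : PySem.Dict Int (List Int)) p => d.modify p.1 [] (· ++ [p.2])) PySem.Dict.empty).getD e []
    = grp links e := by
  rw [PySem.Dict.getD_foldl_modify_append]
  rw [PySem.Dict.getD_empty]
  rw [List.filter_map, List.map_map]
  rw [PySem.List.enumerate_eq_map_pyRange _ (0 : Int)]
  rw [List.filter_map, List.map_map]
  simp only [grp, srcAt, PySem.List.len_eq, List.length_map]
  simp only [Function.comp_def]
  simp [List.map_id']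

-- the common canonical loop: A's counter-carrying fold equals B's enumerate fold
theorem foldGen (G : Int → List Int) (nodes : List Int) (a b : List Int) (c : Int) :
    nodes.foldl (fun (st : List Int × List Int × Int) e =>
        (st.1 ++ G e, st.2.1 ++ List.replicate (G e).length st.2.2, st.2.2 + 1)) (a, b, c)
    = (((PySem.List.enumerate nodes c).foldl
        (fun (acc : List Int × List Int) (q : Int × Int) =>
          (acc.1 ++ G q.2, acc.2 ++ List.replicate (G q.2).length q.1)) (a, b)).1,
       ((PySem.List.enumerate nodes c).foldl
        (fun (acc : List Int × List Int) (q : Int × Int) =>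
          (acc.1 ++ G q.2, acc.2 ++ List.replicate (G q.2).length q.1)) (a, b)).2,
       c + nodes.length) := by
  induction nodes generalizing a b c with
  | nil => simp [PySem.List.enumerate]
  | cons x xs ih =>
    simp only [List.foldl_cons, PySem.List.enumerate_cons, List.length_cons]
    rw [ih]
    have : (c : Int) + 1 + (xs.length : Int) = c + ((xs.length + 1 : Nat) : Int) := by push_cast; ring
    rw [this]

theorem ports_agree (links : List (List Int)) (nodes : List Int) :
    get_links_nodes links nodes = get_links_nodes_alt links nodes := by
  unfold get_links_nodes get_links_nodes_alt
  simp only []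
  have hA : (fun (st : List Int × List Int × Int) (elem : Int) =>
      let inner := (PySem.List.pyRange 0 links.length 1).foldl
        (fun (p : List Int × List Int) (i : Int) =>
          if PySem.List.pyGetD (PySem.List.pyGetD links i []) 0 0 == elem
          then (p.1 ++ [i], p.2 ++ [st.2.2]) else p)
        (st.1, st.2.1)
      (inner.1, inner.2, st.2.2 + 1))
    = (fun (st : List Int × List Int × Int) e =>
        (st.1 ++ grp links e, st.2.1 ++ List.replicate (grp links e).length st.2.2, st.2.2 + 1)) := by
    funext st e
    simp only []
    rw [pairFold]
    rfl
  have hB : (fun (acc : List Int × List Int) (q : Int × Int) =>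
      let idxs := (((PySem.List.enumerate (links.map (fun l => PySem.List.pyGetD l 0 0))).map (fun q => (q.2, q.1))).foldl
        (fun (d : PySem.Dict Int (List Int)) p => d.modify p.1 [] (· ++ [p.2])) PySem.Dict.empty).getD q.2 []
      (acc.1 ++ idxs, acc.2 ++ List.replicate idxs.length q.1))
    = (fun (acc : List Int × List Int) (q : Int × Int) =>
        (acc.1 ++ grp links q.2, acc.2 ++ List.replicate (grp links q.2).length q.1)) := by
    funext acc q
    simp only [dictGrp]
  rw [hA, hB, foldGen]
  rw [PySem.List.foldl_append_singleton_eq_map]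
  simp only [List.nil_append]
  rw [show (fun i => PySem.List.pyGetD (PySem.List.pyGetD links i []) 0 0) = (fun i => gsrc links i) from rfl, mapSrc]

-- ===== VERDICT (by name: the statement is the Claim_ definition above) =====
theorem get_links_nodes_spec : Claim_equal_get_links_nodes := by
  intro links nodes _ _
  unfold Spec_get_links_nodes
  exact ports_agree links nodes
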